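-- pv_equiv track=rewrite | github.com/MrBrantCode/unitest_baseline | mut_generate/mist_train_cf/cf_21915/solution.py | reverse_and_sum
-- ===== SOURCE A (Python) =====
-- def reverse_and_sum(num: int) -> int:
--     """
--     This function takes an integer as input, reverses it, and returns the sum of its digits.
--     It handles both positive and negative integers, preserving the sign in the reversed integer.
--     If the reversed integer overflows, it returns 0.
--
--     The time complexity is O(logN) and the space complexity is O(1).
--
--     Args:
--         num (int): The input integer.
--
--     Returns:
--         int: The sum of the digits of the reversed integer.
--     """
--
--     # Initialize variables
--     reverse = 0
--     total_sum = 0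
--     is_negative = False
--     INT_MAX, INT_MIN = 2**31 - 1, -2**31
--
--     # Check if the number is negative
--     if num < 0:
--         is_negative = True
--         num = -num
--
--     # Reverse the number and calculate the sum of its digits
--     while num > 0:
--         last_digit = num % 10
--         reverse = reverse * 10 + last_digit
--         total_sum += last_digit
--         num //= 10
--
--     # Preserve the sign
--     if is_negative:
--         reverse = -reverse
--
--     # Check for overflow
--     if reverse > INT_MAX or reverse < INT_MIN:
--         return 0
--
--     return total_sum
-- ===== SOURCE B (Python) =====
-- def reverse_and_sum(num: int) -> int:
--     # String-based: reverse the decimal representation instead of an arithmetic loop.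
--     s = str(-num if num < 0 else num)
--     total = sum(ord(c) - 48 for c in s)
--     rev = 0
--     for c in reversed(s):
--         rev = rev * 10 + (ord(c) - 48)
--     if num < 0:
--         rev = -rev
--     if rev > 2**31 - 1 or rev < -2**31:
--         return 0
--     return total
-- ===== Notes on version B (the rewrite author's own statement) =====
-- stated objective: idiomatic
-- what changed: Replaces the modulo/division while-loop by converting the number to its decimal string: the digit sum is a sum over the characters and the reversed value is accumulated by scanning the string right-to-left.
import Mathlib
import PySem

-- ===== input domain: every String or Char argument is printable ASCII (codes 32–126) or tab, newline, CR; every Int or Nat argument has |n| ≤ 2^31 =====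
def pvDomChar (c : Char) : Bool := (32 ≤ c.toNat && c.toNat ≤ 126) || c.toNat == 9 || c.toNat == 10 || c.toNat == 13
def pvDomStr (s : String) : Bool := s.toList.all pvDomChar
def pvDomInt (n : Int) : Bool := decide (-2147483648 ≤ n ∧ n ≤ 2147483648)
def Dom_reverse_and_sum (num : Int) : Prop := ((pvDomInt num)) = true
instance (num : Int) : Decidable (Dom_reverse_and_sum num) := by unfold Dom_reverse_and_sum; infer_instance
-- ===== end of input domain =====

-- B replaces A's modulo/division accumulation loop by converting the number to its
-- decimal string and reading digits off the characters (idiomatic; same cost).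


-- ===== PORT A =====
-- the `while num > 0` loop carrying (reverse, total_sum)
def reverse_and_sum_loopA (num rev total : Int) : Int × Int :=
  if _h : num > 0 then
    let last := PySem.Int.mod num 10
    reverse_and_sum_loopA (PySem.Int.floordiv num 10) (rev * 10 + last) (total + last)
  else (rev, total)
termination_by num.toNat
decreasing_by
  have h10 : PySem.Int.floordiv num 10 = num / 10 :=
    PySem.Int.floordiv_eq_ediv_of_pos (by norm_num)
  rw [h10]
  omega

def reverse_and_sum (num : Int) : Int :=
  let INT_MAX : Int := 2 ^ 31 - 1
  let INT_MIN : Int := -2 ^ 31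
  let isNegative := num < 0
  let num := if isNegative then -num else num
  let (reverse, total_sum) := reverse_and_sum_loopA num 0 0
  let reverse := if isNegative then -reverse else reverse
  if reverse > INT_MAX ∨ reverse < INT_MIN then 0 else total_sum

-- ===== PORT B =====
def reverse_and_sum_alt (num : Int) : Int :=
  let s := PySem.Int.toChars (if num < 0 then -num else num)   -- str(-num if num < 0 else num)
  let total : Int := (s.map (fun c => ((c.toNat : Int) - 48))).sum  -- sum(ord(c) - 48 for c in s)
  let rev : Int := s.reverse.foldl (fun r c => r * 10 + ((c.toNat : Int) - 48)) 0  -- for c in reversed(s)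
  let rev := if num < 0 then -rev else rev
  if rev > 2 ^ 31 - 1 ∨ rev < -2 ^ 31 then 0 else total

-- ===== PRECONDITION & SPEC =====
def Spec_reverse_and_sum (num : Int) (out : Int) : Prop := out = reverse_and_sum_alt num
instance (num : Int) (out : Int) : Decidable (Spec_reverse_and_sum num out) := by unfold Spec_reverse_and_sum; infer_instance

-- ===== CLAIM (what is proved, stated in full; the proofs are below) =====
def Claim_equal_reverse_and_sum : Prop := ∀ (num : Int), Dom_reverse_and_sum num → Spec_reverse_and_sum num (reverse_and_sum num)

-- ===== LEMMAS AND PROOFS =====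

-- A's loop over a nonnegative number computes the LSB-first fold and the digit sum of Nat.digits 10
theorem loopA_eq (m : Nat) (rev total : Int) :
    reverse_and_sum_loopA (m : Int) rev total =
      ((Nat.digits 10 m).foldl (fun (r : Int) (d : Nat) => r * 10 + (d : Int)) rev,
       total + ((Nat.digits 10 m).sum : Int)) := by
  induction m using Nat.strong_induction_on generalizing rev total with
  | _ m ih =>
    rcases Nat.eq_zero_or_pos m with hm | hm
    · subst hm
      rw [reverse_and_sum_loopA]
      simp
    · rw [reverse_and_sum_loopA]
      have hpos : (m : Int) > 0 := by exact_mod_cast hm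
      rw [dif_pos hpos]
      have hmod : PySem.Int.mod (m : Int) 10 = ((m % 10 : Nat) : Int) := by
        rw [PySem.Int.mod_eq_emod_of_pos (by norm_num)]
        push_cast; rfl
      have hdiv : PySem.Int.floordiv (m : Int) 10 = ((m / 10 : Nat) : Int) := by
        rw [PySem.Int.floordiv_eq_ediv_of_pos (by norm_num)]
        push_cast; rfl
      rw [hmod, hdiv, ih (m / 10) (Nat.div_lt_self hm (by norm_num)),
        Nat.digits_def' (by norm_num : 1 < 10) hm]
      simp only [List.sum_cons, Prod.mk.injEq]
      constructor
      · rfl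
      · push_cast; ring

-- str(m) is the MSB-first digit characters
theorem toDigits_eq (m : Nat) (hm : 0 < m) :
    Nat.toDigits 10 m = ((Nat.digits 10 m).reverse).map Nat.digitChar := by
  induction m using Nat.strong_induction_on with
  | _ m ih =>
    rw [Nat.toDigits_eq_if (by norm_num), Nat.digits_def' (by norm_num : 1 < 10) hm]
    by_cases hlt : m < 10
    · have h0 : m / 10 = 0 := Nat.div_eq_of_lt hlt
      rw [if_pos hlt, h0]
      simp [Nat.mod_eq_of_lt hlt]
    · rw [if_neg hlt,
        ih (m / 10) (Nat.div_lt_self hm (by norm_num)) (by omega)]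
      simp

theorem digitChar_val {d : Nat} (hd : d < 10) :
    ((Nat.digitChar d).toNat : Int) - 48 = (d : Int) := by
  interval_cases d <;> decide

-- the two character passes of B compute exactly A's loop results
theorem alt_chars_eq (m : Nat) :
    ((Nat.toDigits 10 m).map (fun c => ((c.toNat : Int) - 48))).sum
        = ((Nat.digits 10 m).sum : Int)
    ∧ (Nat.toDigits 10 m).reverse.foldl (fun r c => r * 10 + ((c.toNat : Int) - 48)) 0
        = (Nat.digits 10 m).foldl (fun (r : Int) (d : Nat) => r * 10 + (d : Int)) 0 := by
  rcases Nat.eq_zero_or_pos m with hm | hm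
  · subst hm; constructor <;> decide
  · have hlt : ∀ d ∈ Nat.digits 10 m, d < 10 := fun d hd =>
      Nat.digits_lt_base (by norm_num) hd
    have hmap : List.map ((fun c => ((c.toNat : Int) - 48)) ∘ Nat.digitChar) (Nat.digits 10 m)
        = List.map (fun d : Nat => (d : Int)) (Nat.digits 10 m) :=
      List.map_congr_left fun d hd => digitChar_val (hlt d hd)
    rw [toDigits_eq m hm]
    constructor
    · rw [List.map_reverse, List.map_reverse, List.map_map, List.sum_reverse, hmap]
      simp
    · rw [List.map_reverse, List.reverse_reverse, List.foldl_map]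
      exact PySem.List.foldl_congr_mem _ _ _ _
        (fun r d hd => by rw [digitChar_val (hlt d hd)])

-- ===== VERDICT (by name: the statement is the Claim_ definition above) =====
theorem reverse_and_sum_spec : Claim_equal_reverse_and_sum := by
  intro num _
  unfold Spec_reverse_and_sum
  set m : Nat := (if num < 0 then -num else num).toNat with hm
  have hcast : ((m : Int)) = (if num < 0 then -num else num) := by
    rw [hm]; split <;> omega
  have htc : PySem.Int.toChars ((m : Int)) = Nat.toDigits 10 m := by
    simp [PySem.Int.toChars]
  obtain ⟨hsum, hrev⟩ := alt_chars_eq m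
  simp only [reverse_and_sum, reverse_and_sum_alt, ← hcast, htc, loopA_eq, hsum, hrev,
    zero_add]
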